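-- pv_equiv track=rewrite | github.com/JaewanHwang/algorithm-study | pro_괄호 변환/황재완.py | go
-- ===== SOURCE A (Python) =====
-- def go(w):
--     if w == '':
--         return w
--     u, v = '', ''
--     l, r = 0, 0
--     for c in w:
--         if c == '(':
--             l += 1
--         else:
--             r += 1
--         u += c
--         if l == r:
--             break
--     v = w[l + r:]
--     if evaluate(u):
--         return u + go(v)
--     else:
--         return '(' + go(v) + ')' + ''.join(map(lambda x: '(' if x == ')' else ')', u[1:len(u) - 1]))
--
-- def evaluate(w):
--     stack = []
--     for c in w:
--         if c == '(':
--             stack.append(c)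
--         else:
--             if not stack:
--                 return False
--             stack.pop()
--     if stack:
--         return False
--     return True
-- ===== SOURCE B (Python) =====
-- def go(w):
--     # Iterative, non-recursive: split w into minimal balance-zero segments in
--     # one pass; a correct segment is appended to the prefix, an incorrect or
--     # unterminated one contributes an opener to the prefix and defers a closer
--     # plus the flipped interior to a suffix stack, emptied in reverse at the end.
--     pre = []
--     post = []
--     cur = []
--     bal = 0
--     for c in w:
--         cur.append(c)
--         bal += 1 if c == '(' else -1
--         if bal == 0:
--             if cur[0] == '(':
--                 pre.append(''.join(cur))
--             else:
--                 pre.append('(')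
--                 post.append(')' + ''.join('(' if x == ')' else ')' for x in cur[1:-1]))
--             cur = []
--     if cur:
--         pre.append('(')
--         post.append(')' + ''.join('(' if x == ')' else ')' for x in cur[1:-1]))
--     return ''.join(pre) + ''.join(reversed(post))
-- ===== Notes on version B (the rewrite author's own statement) =====
-- stated objective: alternative
-- what changed: Replaces A's recursive decomposition and its stack-based evaluate rescan of each prefix by a fully iterative single pass: w is split into minimal balance-zero segments with one counter, good segments go to a prefix accumulator, bad or unterminated segments push a deferred closer-plus-flipped-interior piece onto a suffix stack that is emptied in reverse at the end.
import Mathlib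
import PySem

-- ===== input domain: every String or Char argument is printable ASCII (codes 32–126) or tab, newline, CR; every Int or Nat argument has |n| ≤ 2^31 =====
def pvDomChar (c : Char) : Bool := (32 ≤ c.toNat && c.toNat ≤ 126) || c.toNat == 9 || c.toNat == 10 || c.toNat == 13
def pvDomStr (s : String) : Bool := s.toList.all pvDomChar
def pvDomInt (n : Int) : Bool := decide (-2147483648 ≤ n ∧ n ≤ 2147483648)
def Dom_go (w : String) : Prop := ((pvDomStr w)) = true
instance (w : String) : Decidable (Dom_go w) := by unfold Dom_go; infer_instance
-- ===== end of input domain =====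

-- B replaces A's recursion (with its stack-based evaluate helper) by one iterative
-- pass over w: minimal balance-zero segments feed a prefix accumulator and a
-- deferred-suffix stack, assembled at the end (objective: alternative).

-- ===== PORT A =====
-- evaluate's loop: `stack` is Python's list used as a stack (append/pop at one end)
def evalLoop : List Char → List Char → Bool
  | [], stack => stack.isEmpty
  | c :: cs, stack =>
    if c = '(' then evalLoop cs (c :: stack)
    else match stack with
      | [] => false
      | _ :: s => evalLoop cs s

def evaluateA (w : List Char) : Bool := evalLoop w []

-- A's for-loop over w: accumulates u, l, r and breaks when l == r
def scanA : List Char → List Char → Int → Int → List Char × Int × Int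
  | [], u, l, r => (u, l, r)
  | c :: cs, u, l, r =>
    let l' := if c = '(' then l + 1 else l
    let r' := if c = '(' then r else r + 1
    let u' := u ++ [c]
    if l' = r' then (u', l', r') else scanA cs u' l' r'

-- termination helper for goL (the loop consumes at least one char)
theorem scanA_sum_ge : ∀ (cs u : List Char) (l r : Int), cs ≠ [] →
    l + r + 1 ≤ (scanA cs u l r).2.1 + (scanA cs u l r).2.2 := by
  intro cs
  induction cs with
  | nil => intro u l r h; exact absurd rfl h
  | cons c cs ih =>
    intro u l r _
    by_cases hc : c = '('
    · simp only [scanA, hc, reduceIte]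
      by_cases h2 : l + 1 = r
      · rw [if_pos h2]; show l + r + 1 ≤ l + 1 + r; omega
      · rw [if_neg h2]
        cases cs with
        | nil => show l + r + 1 ≤ l + 1 + r; omega
        | cons d ds => have := ih (u ++ ['(']) (l + 1) r (by simp); omega
    · simp only [scanA, hc, reduceIte]
      by_cases h2 : l = r + 1
      · rw [if_pos h2]; show l + r + 1 ≤ l + (r + 1); omega
      · rw [if_neg h2]
        cases cs with
        | nil => show l + r + 1 ≤ l + (r + 1); omega
        | cons d ds => have := ih (u ++ [c]) l (r + 1) (by simp); omega

theorem goL_dec (w : List Char) (hne : ¬ w = []) :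
    (PySem.List.slice w (some ((scanA w [] 0 0).2.1 + (scanA w [] 0 0).2.2)) none).length < w.length := by
  have h1 := scanA_sum_ge w [] 0 0 hne
  rw [PySem.List.slice_from w (a := (scanA w [] 0 0).2.1 + (scanA w [] 0 0).2.2) (by omega)]
  have h3 : 0 < w.length := List.length_pos_iff.mpr (by simpa using hne)
  simp only [List.length_drop]; omega

def goL (w : List Char) : List Char :=
  if h : w = [] then w
  else
    let t := scanA w [] 0 0
    let u := t.1
    let v := PySem.List.slice w (some (t.2.1 + t.2.2)) none
    if evaluateA u then u ++ goL v
    else '(' :: (goL v ++ ')' ::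
      (PySem.List.slice u (some 1) (some ((u.length : Int) - 1))).map
        (fun x => if x = ')' then '(' else ')'))
termination_by w.length
decreasing_by all_goals exact goL_dec w h

def go (w : String) : String := String.mk (goL w.toList)

-- ===== PORT B =====
-- ')' + flipped interior of a finished (bad) segment: cur[1:-1] with brackets flipped
def flipPiece (cur : List Char) : List Char :=
  ')' :: (PySem.List.slice cur (some 1) (some ((cur.length : Int) - 1))).map
    (fun x => if x = ')' then '(' else ')')

-- B's single for-loop: state = (current segment, balance, prefix pieces, suffix stack)
def loopB : List Char → List Char → Int → List (List Char) → List (List Char) →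
    List (List Char) × List (List Char)
  | [], cur, _, pre, post =>
      if cur ≠ [] then (pre ++ [['(']], post ++ [flipPiece cur]) else (pre, post)
  | c :: cs, cur, bal, pre, post =>
      let cur' := cur ++ [c]
      let bal' := bal + (if c = '(' then 1 else -1)
      if bal' = 0 then
        if PySem.List.pyGet? cur' 0 == some '(' then loopB cs [] 0 (pre ++ [cur']) post
        else loopB cs [] 0 (pre ++ [['(']]) (post ++ [flipPiece cur'])
      else loopB cs cur' bal' pre post

def go_alt (w : String) : String :=
  String.mk ((loopB w.toList [] 0 [] []).1.flatten ++
    (loopB w.toList [] 0 [] []).2.reverse.flatten)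

-- ===== PRECONDITION & SPEC =====
def Spec_go (w : String) (out : String) : Prop := out = go_alt w
instance (w : String) (out : String) : Decidable (Spec_go w out) := by unfold Spec_go; infer_instance

-- ===== CLAIM (what is proved, stated in full; the proofs are below) =====
def Claim_equal_go : Prop := ∀ (w : String), Dom_go w → Spec_go w (go w)

-- ===== LEMMAS AND PROOFS =====

-- running balance of a string
def balL : List Char → Int
  | [] => 0
  | c :: cs => (if c = '(' then 1 else -1) + balL cs

-- reference: split off the minimal prefix whose running balance (started at b) hits 0
def cut : List Char → Int → Option (List Char × List Char)
  | [], _ => none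
  | c :: cs, b =>
    let b' := b + (if c = '(' then 1 else -1)
    if b' = 0 then some ([c], cs) else (cut cs b').map (fun pq => (c :: pq.1, pq.2))

theorem cut_append : ∀ (cs : List Char) (b : Int) (p q : List Char),
    cut cs b = some (p, q) → cs = p ++ q ∧ p ≠ [] := by
  intro cs
  induction cs with
  | nil => intro b p q h; simp [cut] at h
  | cons c cs ih =>
    intro b p q h
    simp only [cut] at h
    by_cases hz : b + (if c = '(' then 1 else -1) = 0
    · rw [if_pos hz] at h
      injection h with h
      injection h with h1 h2
      subst h1; subst h2; simp
    · rw [if_neg hz] at h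
      cases hc : cut cs (b + if c = '(' then 1 else -1) with
      | none => rw [hc] at h; simp at h
      | some pq =>
        rw [hc] at h
        simp only [Option.map_some, Option.some.injEq] at h
        obtain ⟨he, _⟩ := ih _ pq.1 pq.2 hc
        injection h with h1 h2
        subst h1; subst h2
        exact ⟨by simp [he], by simp⟩

theorem scanA_eq : ∀ (cs u : List Char) (l r : Int),
    (match cut cs (l - r) with
      | some pq => (scanA cs u l r).1 = u ++ pq.1 ∧
          (scanA cs u l r).2.1 + (scanA cs u l r).2.2 = l + r + pq.1.length
      | none => (scanA cs u l r).1 = u ++ cs ∧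
          (scanA cs u l r).2.1 + (scanA cs u l r).2.2 = l + r + cs.length) := by
  intro cs
  induction cs with
  | nil => intro u l r; simp [cut, scanA]
  | cons c cs ih =>
    intro u l r
    simp only [cut, scanA]
    by_cases hc : c = '('
    · simp only [hc, reduceIte]
      by_cases hz : l - r + 1 = 0
      · have h2 : l + 1 = r := by omega
        rw [if_pos hz, if_pos h2]
        refine ⟨rfl, ?_⟩
        show l + 1 + r = l + r + (([ '(' ] : List Char).length : Int)
        simp; omega
      · have h2 : ¬ (l + 1 = r) := by omega
        rw [if_neg hz, if_neg h2]
        have hrec := ih (u ++ ['(']) (l + 1) r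
        rw [show l + 1 - r = l - r + 1 by omega] at hrec
        cases hcc : cut cs (l - r + 1) with
        | none =>
          rw [hcc] at hrec
          simp only [Option.map_none] at hrec ⊢
          refine ⟨by rw [hrec.1]; simp, ?_⟩
          have := hrec.2
          simp only [List.length_cons]
          push_cast at this ⊢
          omega
        | some pq =>
          rw [hcc] at hrec
          simp only [Option.map_some] at hrec ⊢
          refine ⟨by rw [hrec.1]; simp, ?_⟩
          have := hrec.2
          simp only [List.length_cons]
          push_cast at this ⊢
          omega
    · simp only [hc, reduceIte]
      by_cases hz : l - r + -1 = 0
      · have h2 : l = r + 1 := by omega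
        rw [if_pos hz, if_pos h2]
        refine ⟨rfl, ?_⟩
        show l + (r + 1) = l + r + (([c] : List Char).length : Int)
        simp only [List.length_cons, List.length_nil]
        push_cast
        omega
      · have h2 : ¬ (l = r + 1) := by omega
        rw [if_neg hz, if_neg h2]
        have hrec := ih (u ++ [c]) l (r + 1)
        rw [show l - (r + 1) = l - r + -1 by omega] at hrec
        cases hcc : cut cs (l - r + -1) with
        | none =>
          rw [hcc] at hrec
          simp only [Option.map_none] at hrec ⊢
          refine ⟨by rw [hrec.1]; simp, ?_⟩
          have := hrec.2
          simp only [List.length_cons]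
          push_cast at this ⊢
          omega
        | some pq =>
          rw [hcc] at hrec
          simp only [Option.map_some] at hrec ⊢
          refine ⟨by rw [hrec.1]; simp, ?_⟩
          have := hrec.2
          simp only [List.length_cons]
          push_cast at this ⊢
          omega

theorem evalLoop_true_bal : ∀ (cs s : List Char), evalLoop cs s = true →
    (s.length : Int) + balL cs = 0 := by
  intro cs
  induction cs with
  | nil => intro s h; simp [evalLoop, List.isEmpty_iff] at h; simp [h, balL]
  | cons c cs ih =>
    intro s h
    simp only [evalLoop] at h
    by_cases hc : c = '('
    · rw [if_pos hc] at h
      have := ih _ h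
      simp only [balL, List.length_cons, if_pos hc] at this ⊢
      push_cast at this ⊢
      omega
    · rw [if_neg hc] at h
      cases s with
      | nil => simp at h
      | cons x s' =>
        simp only at h
        have := ih _ h
        simp only [balL, List.length_cons, if_neg hc] at this ⊢
        push_cast at this ⊢
        omega

theorem cut_none_bal : ∀ (cs : List Char) (b : Int), b ≠ 0 → cut cs b = none →
    b + balL cs ≠ 0 := by
  intro cs
  induction cs with
  | nil => intro b hb _; simpa [balL] using hb
  | cons c cs ih =>
    intro b hb h
    simp only [cut] at h
    by_cases hz : b + (if c = '(' then 1 else -1) = 0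
    · rw [if_pos hz] at h; simp at h
    · rw [if_neg hz] at h
      cases hc : cut cs (b + if c = '(' then 1 else -1) with
      | some pq => rw [hc] at h; simp at h
      | none =>
        have := ih _ hz hc
        simp only [balL]; omega

theorem evalLoop_cut_pos : ∀ (cs : List Char) (b : Int) (p q s : List Char),
    0 < b → cut cs b = some (p, q) → (s.length : Int) = b → evalLoop p s = true := by
  intro cs
  induction cs with
  | nil => intro b p q s _ h _; simp [cut] at h
  | cons c cs ih =>
    intro b p q s hb h hs
    simp only [cut] at h
    by_cases hz : b + (if c = '(' then 1 else -1) = 0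
    · rw [if_pos hz] at h
      have hc : ¬ c = '(' := by intro hcc; rw [if_pos hcc] at hz; omega
      rw [if_neg hc] at hz
      injection h with h
      injection h with h1 h2
      subst h1
      cases s with
      | nil => exfalso; simp at hs; omega
      | cons x s' =>
        simp only [evalLoop, if_neg hc]
        have hs' : s' = [] := by
          have : s'.length = 0 := by simp at hs; omega
          exact List.eq_nil_of_length_eq_zero this
        subst hs'
        simp
    · rw [if_neg hz] at h
      cases hc : cut cs (b + if c = '(' then 1 else -1) with
      | none => rw [hc] at h; simp at h
      | some pq =>
        rw [hc] at h
        simp only [Option.map_some, Option.some.injEq] at h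
        injection h with h1 h2
        subst h1
        by_cases hcp : c = '('
        · subst hcp
          simp only [evalLoop, reduceIte]
          refine ih (b + 1) pq.1 pq.2 ('(' :: s) (by omega) ?_ (by simp; omega)
          simpa using hc
        · rw [if_neg hcp] at hz hc
          have hb2 : 2 ≤ b := by omega
          cases s with
          | nil => exfalso; simp at hs; omega
          | cons x s' =>
            simp only [evalLoop, if_neg hcp]
            refine ih (b + -1) pq.1 pq.2 s' (by omega) hc (by simp at hs ⊢; omega)

theorem eval_cut_some : ∀ (c : Char) (cs p q : List Char),
    cut (c :: cs) 0 = some (p, q) → evaluateA p = decide (c = '(') := by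
  intro c cs p q h
  simp only [cut] at h
  by_cases hc : c = '('
  · rw [if_pos hc] at h
    rw [if_neg (by omega : ¬ ((0 : Int) + 1 = 0))] at h
    cases hcc : cut cs (0 + 1) with
    | none => rw [hcc] at h; simp at h
    | some pq =>
      rw [hcc] at h
      simp only [Option.map_some, Option.some.injEq] at h
      injection h with h1 h2
      subst h1
      simp only [evaluateA, evalLoop, if_pos hc]
      rw [evalLoop_cut_pos cs 1 pq.1 pq.2 [c] (by omega) (by simpa using hcc)
        (by simp)]
      simp [hc]
  · rw [if_neg hc] at h
    rw [if_neg (by omega : ¬ ((0 : Int) + -1 = 0))] at h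
    cases hcc : cut cs (0 + -1) with
    | none => rw [hcc] at h; simp at h
    | some pq =>
      rw [hcc] at h
      simp only [Option.map_some, Option.some.injEq] at h
      injection h with h1 h2
      subst h1
      simp [evaluateA, evalLoop, hc]

theorem eval_cut_none : ∀ (w : List Char), w ≠ [] → cut w 0 = none → evaluateA w = false := by
  intro w hw h
  cases w with
  | nil => exact absurd rfl hw
  | cons c cs =>
    simp only [cut] at h
    by_cases hz : (0 : Int) + (if c = '(' then 1 else -1) = 0
    · rw [if_pos hz] at h; simp at h
    · rw [if_neg hz] at h
      cases hc : cut cs ((0 : Int) + if c = '(' then 1 else -1) with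
      | some pq => rw [hc] at h; simp at h
      | none =>
        have hbal := cut_none_bal cs _ hz hc
        cases he : evaluateA (c :: cs) with
        | false => rfl
        | true =>
          exfalso
          have hb2 := evalLoop_true_bal (c :: cs) [] he
          simp only [balL, List.length_nil, Nat.cast_zero, zero_add] at hb2
          apply hbal
          omega

-- goL characterized through cut: the no-break case
theorem goL_cut_none (w : List Char) (hw : w ≠ []) (h : cut w 0 = none) :
    goL w = '(' :: ')' ::
      (PySem.List.slice w (some 1) (some ((w.length : Int) - 1))).map
        (fun x => if x = ')' then '(' else ')') := by
  rw [goL]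
  simp only [dif_neg hw]
  have hA := scanA_eq w [] 0 0
  rw [show (0 : Int) - 0 = 0 by omega, h] at hA
  simp only at hA
  obtain ⟨hu, hsum⟩ := hA
  rw [hu, hsum]
  simp only [List.nil_append, zero_add]
  rw [eval_cut_none w hw h]
  simp only [Bool.false_eq_true]
  rw [if_neg (by simp)]
  have hv : PySem.List.slice w (some ((w.length : Int))) none = [] := by
    rw [PySem.List.slice_from_natCast]; simp
  rw [hv]
  rw [show goL ([] : List Char) = [] by rw [goL]; simp]
  simp

-- goL characterized through cut: the break case
theorem goL_cut_some (w p q : List Char) (h : cut w 0 = some (p, q)) :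
    goL w = if p.head? = some '(' then p ++ goL q
      else '(' :: (goL q ++ ')' ::
        (PySem.List.slice p (some 1) (some ((p.length : Int) - 1))).map
          (fun x => if x = ')' then '(' else ')')) := by
  obtain ⟨hw_eq, hp⟩ := cut_append w 0 p q h
  have hw : w ≠ [] := by
    rw [hw_eq]; intro hh; simp at hh; exact hp hh.1
  obtain ⟨c, cs, hcc⟩ := List.exists_cons_of_ne_nil hw
  rw [goL]
  simp only [dif_neg hw]
  have hA := scanA_eq w [] 0 0
  rw [show (0 : Int) - 0 = 0 by omega, h] at hA
  simp only at hA
  obtain ⟨hu, hsum⟩ := hA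
  rw [hu, hsum]
  simp only [List.nil_append, zero_add]
  have hvA : PySem.List.slice w (some ((p.length : Int))) none = q := by
    rw [PySem.List.slice_from_natCast, hw_eq]
    simp
  rw [hvA]
  rw [hcc] at h
  rw [eval_cut_some c cs p q h]
  obtain ⟨p1, ps, hpc⟩ := List.exists_cons_of_ne_nil hp
  have hpc1 : p1 = c := by
    rw [hcc, hpc] at hw_eq
    exact (List.cons_eq_cons.mp hw_eq).1.symm
  subst hpc1
  rw [hpc]
  simp only [List.head?_cons]
  by_cases hc : p1 = '('
  · simp [hc]
  · simp [hc]

-- the flattened result of loopB's final state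
def flat (t : List (List Char) × List (List Char)) : List Char :=
  t.1.flatten ++ t.2.reverse.flatten

-- loopB, scanned from a segment boundary offset by cur/bal, expressed through cut
theorem loopB_cut : ∀ (cs cur : List Char) (bal : Int) (pre post : List (List Char)),
    loopB cs cur bal pre post =
      match cut cs bal with
      | none =>
          if cur ++ cs ≠ [] then (pre ++ [['(']], post ++ [flipPiece (cur ++ cs)])
          else (pre, post)
      | some pq =>
          if PySem.List.pyGet? (cur ++ pq.1) 0 == some '('
          then loopB pq.2 [] 0 (pre ++ [cur ++ pq.1]) post
          else loopB pq.2 [] 0 (pre ++ [['(']]) (post ++ [flipPiece (cur ++ pq.1)]) := by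
  intro cs
  induction cs with
  | nil => intro cur bal pre post; simp [loopB, cut]
  | cons c cs ih =>
    intro cur bal pre post
    simp only [loopB, cut]
    by_cases hz : bal + (if c = '(' then 1 else -1) = 0
    · simp [hz]
    · rw [if_neg hz, if_neg hz, ih]
      cases hcc : cut cs (bal + if c = '(' then 1 else -1) with
      | none => simp
      | some pq => simp

-- main invariant: one loopB run from a segment boundary computes goL of the rest
theorem loopB_goL : ∀ (n : Nat) (w : List Char), w.length ≤ n →
    ∀ (pre post : List (List Char)),
      flat (loopB w [] 0 pre post) = pre.flatten ++ goL w ++ post.reverse.flatten := by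
  intro n
  induction n with
  | zero =>
    intro w hw pre post
    have : w = [] := List.eq_nil_of_length_eq_zero (by omega)
    subst this
    rw [show goL ([] : List Char) = [] by rw [goL]; simp]
    simp [loopB, flat]
  | succ n ih =>
    intro w hw pre post
    by_cases h : w = []
    · subst h
      rw [show goL ([] : List Char) = [] by rw [goL]; simp]
      simp [loopB, flat]
    · rw [loopB_cut]
      cases hcut : cut w 0 with
      | none =>
        simp only [List.nil_append, flat]
        rw [if_pos h]
        rw [goL_cut_none w h hcut]
        simp [flipPiece]
      | some pq =>
        obtain ⟨hw_eq, hp⟩ := cut_append w 0 pq.1 pq.2 hcut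
        have hq : pq.2.length ≤ n := by
          have h1 : w.length = pq.1.length + pq.2.length := by rw [hw_eq]; simp
          have h2 : 1 ≤ pq.1.length := List.length_pos_iff.mpr hp
          omega
        obtain ⟨p1, ps, hpc⟩ := List.exists_cons_of_ne_nil hp
        rw [goL_cut_some w pq.1 pq.2 (by rw [hcut])]
        simp only [List.nil_append, hpc, List.head?_cons, PySem.List.pyGet?_zero_cons]
        by_cases hc : p1 = '('
        · rw [if_pos (by simp [hc]), if_pos (by simp [hc])]
          rw [ih pq.2 hq]
          simp
        · rw [if_neg (by simp [hc]), if_neg (by simp [hc])]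
          rw [ih pq.2 hq]
          simp [flipPiece]

theorem goL_eq_alt (w : List Char) :
    (loopB w [] 0 [] []).1.flatten ++ (loopB w [] 0 [] []).2.reverse.flatten = goL w := by
  have := loopB_goL w.length w le_rfl [] []
  simpa [flat] using this

-- ===== VERDICT (by name: the statement is the Claim_ definition above) =====
theorem go_spec : Claim_equal_go := by
  intro w _
  unfold Spec_go go go_alt
  rw [goL_eq_alt]
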